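-- pv_equiv track=rewrite | github.com/vivekjain488/Butterfly | backend/metrics/avalanche.py | bytes_to_bits
-- ===== SOURCE A (Python) =====
-- def bytes_to_bits(byte_data):
--     """Convert bytes to list of bits"""
--     if isinstance(byte_data, str):
--         byte_data = byte_data.encode()
--
--     bits = []
--     for byte in byte_data:
--         for i in range(8):
--             bits.append((byte >> i) & 1)
--     return bits
-- ===== SOURCE B (Python) =====
-- BITS = [[(v >> i) & 1 for i in range(8)] for v in range(256)]
--
-- def bytes_to_bits(byte_data):
--     """Convert bytes to list of bits"""
--     if isinstance(byte_data, str):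
--         byte_data = byte_data.encode()
--     bits = []
--     for byte in byte_data:
--         bits.extend(BITS[byte])
--     return bits
-- ===== Notes on version B (the rewrite author's own statement) =====
-- stated objective: faster
-- what changed: Replaces A's inner 8-iteration bit-shifting loop with a single lookup in a precomputed 256-entry table of LSB-first bit lists, extending the result once per byte.
import Mathlib
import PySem

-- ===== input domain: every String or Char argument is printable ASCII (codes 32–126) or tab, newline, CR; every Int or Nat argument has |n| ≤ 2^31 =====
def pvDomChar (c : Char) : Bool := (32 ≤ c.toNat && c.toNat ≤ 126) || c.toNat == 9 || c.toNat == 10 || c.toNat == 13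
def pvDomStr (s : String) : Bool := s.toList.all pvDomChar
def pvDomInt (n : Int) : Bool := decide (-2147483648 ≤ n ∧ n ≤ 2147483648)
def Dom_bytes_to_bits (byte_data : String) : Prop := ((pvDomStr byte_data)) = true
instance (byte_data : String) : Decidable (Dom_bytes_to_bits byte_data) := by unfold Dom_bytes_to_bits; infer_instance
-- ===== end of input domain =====

-- B replaces A's inner per-bit loop by a single lookup in a precomputed 256-entry bit table (objective: faster, constant factor).

-- ===== PORT A =====
-- A: for each byte, an inner loop over range(8) appends (byte >> i) & 1.
-- '(byte >> i) & 1' is ported as Nat shift/and on c.toNat (exact: byte values are nonnegative).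
def bytes_to_bits (byte_data : String) : List Int :=
  byte_data.toList.foldl (fun bits c =>
    (PySem.List.pyRange 0 8 1).foldl (fun bits i =>
      bits ++ [(((c.toNat >>> i.toNat) &&& 1 : Nat) : Int)]) bits) []

-- ===== PORT B =====
-- table BITS[v] = the 8 bits of v, LSB first, for v in range(256)
def pvBITS : List (List Int) :=
  (List.range 256).map (fun v => (List.range 8).map (fun i => (((v >>> i) &&& 1 : Nat) : Int)))

def bytes_to_bits_alt (byte_data : String) : List Int :=
  byte_data.toList.foldl (fun bits c => bits ++ pvBITS.getD c.toNat []) []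

-- ===== PRECONDITION & SPEC =====
def Spec_bytes_to_bits (byte_data : String) (out : List Int) : Prop := out = bytes_to_bits_alt byte_data
instance (byte_data : String) (out : List Int) : Decidable (Spec_bytes_to_bits byte_data out) := by unfold Spec_bytes_to_bits; infer_instance

-- ===== CLAIM (what is proved, stated in full; the proofs are below) =====
def Claim_equal_bytes_to_bits : Prop := ∀ (byte_data : String), Dom_bytes_to_bits byte_data → Spec_bytes_to_bits byte_data (bytes_to_bits byte_data)

-- ===== LEMMAS AND PROOFS =====
lemma pvBITS_getD (n : Nat) (h : n < 256) :
    pvBITS.getD n [] = (List.range 8).map (fun i => (((n >>> i) &&& 1 : Nat) : Int)) := by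
  simp [pvBITS, List.getD, h]

lemma step_eq (bits : List Int) (c : Char) (h : c.toNat < 256) :
    (PySem.List.pyRange 0 8 1).foldl (fun bits i =>
      bits ++ [(((c.toNat >>> i.toNat) &&& 1 : Nat) : Int)]) bits
    = bits ++ pvBITS.getD c.toNat [] := by
  have hr : PySem.List.pyRange 0 8 1 = [0, 1, 2, 3, 4, 5, 6, 7] := by decide
  rw [hr, pvBITS_getD c.toNat h]
  simp [List.range_succ, List.foldl]

lemma fold_eq (l : List Char) (hl : l.all pvDomChar = true) (bits : List Int) :
    l.foldl (fun bits c =>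
      (PySem.List.pyRange 0 8 1).foldl (fun bits i =>
        bits ++ [(((c.toNat >>> i.toNat) &&& 1 : Nat) : Int)]) bits) bits
    = l.foldl (fun bits c => bits ++ pvBITS.getD c.toNat []) bits := by
  induction l generalizing bits with
  | nil => rfl
  | cons c t ih =>
    simp only [List.all_cons, Bool.and_eq_true] at hl
    have hc : c.toNat < 256 := by
      have := hl.1
      simp [pvDomChar] at this
      omega
    simp only [List.foldl_cons, step_eq bits c hc]
    exact ih hl.2 _

-- ===== VERDICT (by name: the statement is the Claim_ definition above) =====
theorem bytes_to_bits_spec : Claim_equal_bytes_to_bits := by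
  intro s hdom
  unfold Spec_bytes_to_bits bytes_to_bits bytes_to_bits_alt
  exact fold_eq s.toList hdom []
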